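-- pv_equiv track=rewrite | github.com/Olivier-Piron/CodeWars | Python/4kyu/StripComments.py | solution
-- ===== SOURCE A (Python) =====
-- def solution(string, markers):
--     lines = string.split('\n')
--     out = ''
--     for line in lines:
--         for marker in markers:
--             index = line.find(marker)
--             if index != -1:
--                 line = line[:index]
--         out += line.rstrip(' ')+'\n'
--     return out[:-1]
-- ===== SOURCE B (Python) =====
-- def solution(string, markers):
--     # Different strategy: instead of repeatedly truncating the line with find,
--     # enumerate every match position of each marker in the line once (explicit
--     # position scan, cached per distinct marker), then shrink an integer cut
--     # bound over those positions.
--     out = []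
--     for line in string.split('\n'):
--         c = len(line)
--         occ = {}
--         for m in markers:
--             if m not in occ:
--                 occ[m] = [i for i in range(len(line) - len(m) + 1)
--                           if line.startswith(m, i)] if m in line else []
--             c = next((i for i in occ[m] if i + len(m) <= c), c)
--         out.append(line[:c].rstrip(' '))
--     return '\n'.join(out)
-- ===== Notes on version B (the rewrite author's own statement) =====
-- stated objective: alternative
-- what changed: B replaces A's repeated find-and-truncate on a shrinking line by a match-position index: for each distinct marker it enumerates every occurrence position in the original line once (explicit startswith scan, cached in a per-line dict), then only shrinks an integer cut bound by scanning those positions, slicing and joining once at the end.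
import Mathlib
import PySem

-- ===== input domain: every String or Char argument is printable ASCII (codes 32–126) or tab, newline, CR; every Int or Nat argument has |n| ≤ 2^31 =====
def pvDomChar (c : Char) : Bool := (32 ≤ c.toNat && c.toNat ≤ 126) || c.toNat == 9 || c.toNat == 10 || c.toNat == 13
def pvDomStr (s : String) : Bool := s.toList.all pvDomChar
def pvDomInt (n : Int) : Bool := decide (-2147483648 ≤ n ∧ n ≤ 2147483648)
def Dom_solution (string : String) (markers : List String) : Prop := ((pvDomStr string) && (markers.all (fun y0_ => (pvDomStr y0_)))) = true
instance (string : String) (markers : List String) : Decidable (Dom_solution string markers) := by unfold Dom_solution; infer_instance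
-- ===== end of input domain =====

-- B enumerates every match position of each distinct marker in the line once (an explicit
-- position scan building occurrence lists, cached in a dict) and shrinks an integer cut bound
-- over those positions, instead of A's repeated find-and-truncate on the shrinking line; same
-- values everywhere (an alternative decomposition; not claimed faster — the pure-Python scan trades constants).


-- ===== PORT A =====
-- shared primitive: Python's  s.rstrip(' ')  (strip ONLY spaces, from the right) — exact:
-- drop the trailing run of ' ' characters, nothing else.
def pyRstripSpace (s : List Char) : List Char :=
  (s.reverse.dropWhile (fun c => c == ' ')).reverse

def solution (string : String) (markers : List String) : String :=
  let lines := PySem.Chars.splitOn string.toList ['\n']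
  let out := lines.foldl (fun out line =>
    let line := markers.foldl (fun line marker =>
      let index := PySem.Chars.find line marker.toList
      if index ≠ -1 then PySem.List.slice line none (some index) else line) line
    out ++ pyRstripSpace line ++ ['\n']) ([] : List Char)
  String.ofList (PySem.List.slice out none (some (-1)))

-- ===== PORT B =====
-- B's occurrence list:  [i for i in range(len(line) - len(m) + 1) if line.startswith(m, i)]
-- (line.startswith(m, i) with 0 ≤ i ≤ len(line) — the only i the range produces — is exactly
--  startswith on line.drop i; ported by hand since PySem.Chars.startswith has no offset form)
def hitsOf (line m : List Char) : List Int :=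
  (PySem.List.pyRange 0 ((line.length : Int) - (m.length : Int) + 1) 1).filter
    (fun i => PySem.Chars.startswith (line.drop i.toNat) m)

-- B's cut bound:  occ caches the occurrence list per distinct marker ('' in line is m in line);
--   for m in markers: if m not in occ: occ[m] = hits if m in line else []; c = next((i for i in occ[m] if i + len(m) <= c), c)
def cutB (line : List Char) (markers : List (List Char)) : Int :=
  (markers.foldl (fun (st : Int × PySem.Dict (List Char) (List Int)) m =>
    let occ := if st.2.contains m then st.2
               else st.2.insert m (if PySem.Chars.isIn m line then hitsOf line m else [])
    ((((occ.get? m).getD []).find? (fun i => decide (i + (m.length : Int) ≤ st.1))).getD st.1,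
      occ))
    ((line.length : Int), PySem.Dict.empty)).1

def solution_alt (string : String) (markers : List String) : String :=
  String.ofList (PySem.Chars.join ['\n']
    ((PySem.Chars.splitOn string.toList ['\n']).map (fun line =>
      pyRstripSpace (PySem.List.slice line none (some (cutB line (markers.map String.toList)))))))

-- ===== PRECONDITION & SPEC =====
def Spec_solution (string : String) (markers : List String) (out : String) : Prop := out = solution_alt string markers
instance (string : String) (markers : List String) (out : String) : Decidable (Spec_solution string markers out) := by unfold Spec_solution; infer_instance

-- ===== CLAIM (what is proved, stated in full; the proofs are below) =====
def Claim_equal_solution : Prop := ∀ (string : String) (markers : List String), Dom_solution string markers → Spec_solution string markers (solution string markers)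

-- ===== LEMMAS AND PROOFS =====

-- membership in B's occurrence list
lemma mem_hitsOf (line m : List Char) (i : Int) :
    i ∈ hitsOf line m ↔ 0 ≤ i ∧ i ≤ (line.length : Int) ∧ m <+: line.drop i.toNat := by
  simp only [hitsOf, List.mem_filter, PySem.List.mem_pyRange_one, PySem.Chars.startswith_iff]
  constructor
  · rintro ⟨⟨h0, h1⟩, hs⟩
    exact ⟨h0, by omega, hs⟩
  · rintro ⟨h0, h1, hp⟩
    have hlen : m.length ≤ (line.drop i.toNat).length := hp.length_le
    simp only [List.length_drop] at hlen
    exact ⟨⟨h0, by omega⟩, hp⟩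

-- a marker that is not a substring of the line has no occurrence positions
lemma hitsG_eq (line m : List Char) :
    (if PySem.Chars.isIn m line then hitsOf line m else []) = hitsOf line m := by
  by_cases h : PySem.Chars.isIn m line = true
  · rw [if_pos h]
  · rw [if_neg h]
    symm
    rw [List.eq_nil_iff_forall_not_mem]
    intro i hi
    rcases (mem_hitsOf line m i).mp hi with ⟨_, _, hp⟩
    exact h ((PySem.Chars.exists_prefix_drop_iff_isIn m line).mp ⟨i.toNat, hp⟩)

-- the cached-dict fold computes the same cut as the plain fold over hitsOf
lemma cut_fold_eq (line : List Char) :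
    ∀ (ms : List (List Char)) (c : Int) (occ : PySem.Dict (List Char) (List Int)),
      (∀ k v, occ.get? k = some v → v = hitsOf line k) →
      (ms.foldl (fun (st : Int × PySem.Dict (List Char) (List Int)) m =>
          let occ := if st.2.contains m then st.2
                     else st.2.insert m (if PySem.Chars.isIn m line then hitsOf line m else [])
          ((((occ.get? m).getD []).find? (fun i => decide (i + (m.length : Int) ≤ st.1))).getD st.1,
            occ)) (c, occ)).1
        = ms.foldl (fun c m =>
            ((hitsOf line m).find? (fun i => decide (i + (m.length : Int) ≤ c))).getD c) c := by
  intro ms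
  induction ms with
  | nil => intro c occ _; rfl
  | cons m rest ih =>
    intro c occ hinv
    simp only [List.foldl_cons]
    by_cases hc : occ.contains m = true
    · obtain ⟨v, hv⟩ : ∃ v, occ.get? m = some v := by
        rw [PySem.Dict.contains_eq_isSome_get?] at hc
        exact Option.isSome_iff_exists.mp hc
      simp only [if_pos hc, hv, Option.getD_some, hinv m v hv]
      exact ih _ occ hinv
    · simp only [if_neg hc, PySem.Dict.get?_insert_self, Option.getD_some]
      rw [hitsG_eq]
      apply ih
      intro k v hkv
      rw [PySem.Dict.get?_insert] at hkv
      split at hkv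
      · next heq => rw [heq]; exact (Option.some_inj.mp hkv).symm
      · exact hinv k v hkv

-- the occurrence list is strictly increasing
lemma hitsOf_pairwise (line m : List Char) : (hitsOf line m).Pairwise (· < ·) :=
  List.Pairwise.filter _ (PySem.List.pairwise_lt_pyRange_one _ _)

-- find? on a strictly increasing list returns the minimal satisfying element
lemma find?_of_sorted_min (l : List Int) (p : Int → Bool) (a : Int)
    (hs : l.Pairwise (· < ·)) (ha : a ∈ l) (hpa : p a = true)
    (hmin : ∀ x ∈ l, p x = true → a ≤ x) : l.find? p = some a := by
  induction l with
  | nil => cases ha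
  | cons x t ih =>
    by_cases hpx : p x = true
    · have hax : a ≤ x := hmin x (List.mem_cons_self) hpx
      have hxa : a = x := by
        rcases List.mem_cons.mp ha with h | h
        · exact h
        · exact absurd (List.rel_of_pairwise_cons hs h) (by omega)
      rw [List.find?_cons_of_pos hpx, hxa]
    · have hax : a ≠ x := fun h => hpx (h ▸ hpa)
      have hat : a ∈ t := (List.mem_cons.mp ha).resolve_left hax
      rw [List.find?_cons_of_neg (by simpa using hpx)]
      exact ih (List.Pairwise.of_cons hs) hat
        (fun y hy hpy => hmin y (List.mem_cons_of_mem _ hy) hpy)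

-- prefixes of line.take c.toNat are prefixes of line that fit within the bound
lemma prefix_take_bound (line m : List Char) (c : Int) (h0 : 0 ≤ c) (j : Nat) :
    m <+: (line.take c.toNat).drop j ↔ m <+: line.drop j ∧ (j : Int) + (m.length : Int) ≤ c ∨ (m = [] ∧ m <+: (line.take c.toNat).drop j) := by
  constructor
  · intro h
    rcases Nat.eq_zero_or_pos m.length with hm | hm
    · exact Or.inr ⟨List.eq_nil_of_length_eq_zero hm, h⟩
    · rw [List.drop_take] at h
      rcases List.prefix_take_iff.mp h with ⟨hp, hl⟩
      exact Or.inl ⟨hp, by omega⟩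
  · rintro (⟨hp, hb⟩ | ⟨hm, h⟩)
    · rw [List.drop_take]
      exact List.prefix_take_iff.mpr ⟨hp, by omega⟩
    · exact h

-- B's fold step (scan of the occurrence list) equals A's find-on-the-prefix step
lemma step_eq (line m : List Char) (c : Int) (h0 : 0 ≤ c) (h1 : c ≤ (line.length : Int)) :
    ((hitsOf line m).find? (fun i => decide (i + (m.length : Int) ≤ c))).getD c
      = (if PySem.Chars.find (line.take c.toNat) m ≠ -1
          then PySem.Chars.find (line.take c.toNat) m else c) := by
  set F := PySem.Chars.find (line.take c.toNat) m with hF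
  by_cases hne : F ≠ -1
  · -- find succeeds: F is the minimal in-bound occurrence
    have hFpos : 0 ≤ F := by have := PySem.Chars.neg_one_le_find (line.take c.toNat) m; omega
    have hFle : F ≤ (line.take c.toNat).length := PySem.Chars.find_le_length _ m
    have hlt : (line.take c.toNat).length = c.toNat := by
      simp [List.length_take]; omega
    obtain ⟨hpref, hmin⟩ := PySem.Chars.find_spec (s := line.take c.toNat) (sub := m) hFpos
    -- F is a hit satisfying the bound
    have hFmem : F ∈ hitsOf line m ∧ F + (m.length : Int) ≤ c := by
      rcases (prefix_take_bound line m c h0 F.toNat).mp hpref with ⟨hp, hb⟩ | ⟨hm, _⟩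
      · rw [Int.toNat_of_nonneg hFpos] at hb
        exact ⟨(mem_hitsOf line m F).mpr ⟨hFpos, by omega, hp⟩, hb⟩
      · refine ⟨(mem_hitsOf line m F).mpr ⟨hFpos, by omega, hm ▸ List.nil_prefix⟩, ?_⟩
        rw [hm]
        simpa using (by omega : F ≤ c)
    have : (hitsOf line m).find? (fun i => decide (i + (m.length : Int) ≤ c)) = some F := by
      apply find?_of_sorted_min _ _ _ (hitsOf_pairwise line m) hFmem.1 (by simpa using hFmem.2)
      intro x hx hpx
      by_contra hlt'
      push Not at hlt'
      rcases (mem_hitsOf line m x).mp hx with ⟨hx0, hx1, hxp⟩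
      have hxb : (x.toNat : Int) + (m.length : Int) ≤ c := by
        rw [Int.toNat_of_nonneg hx0]; simpa using hpx
      have : m <+: (line.take c.toNat).drop x.toNat :=
        (prefix_take_bound line m c h0 x.toNat).mpr (Or.inl ⟨hxp, hxb⟩)
      exact hmin x.toNat (by omega) this
    rw [this, Option.getD_some, if_pos hne]
  · -- find fails: no hit fits within the bound
    push Not at hne
    have hnin : ¬ m <:+: (line.take c.toNat) := (PySem.Chars.find_eq_neg_one_iff _ _).mp hne
    have : (hitsOf line m).find? (fun i => decide (i + (m.length : Int) ≤ c)) = none := by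
      rw [List.find?_eq_none]
      intro x hx hpx
      rcases (mem_hitsOf line m x).mp hx with ⟨hx0, hx1, hxp⟩
      have hxb : (x.toNat : Int) + (m.length : Int) ≤ c := by
        rw [Int.toNat_of_nonneg hx0]; simpa using hpx
      exact hnin (List.IsInfix.trans ((prefix_take_bound line m c h0 x.toNat).mpr
        (Or.inl ⟨hxp, hxb⟩)).isInfix (List.drop_suffix _ _).isInfix)
    rw [this, Option.getD_none]
    simp [hne]

-- the inner marker loop: A's cumulatively truncated line is the prefix at B's cut index
lemma inner_loop (line : List Char) :
    ∀ (ms : List (List Char)) (c : Int), 0 ≤ c → c ≤ (line.length : Int) →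
      ms.foldl (fun l m =>
          let index := PySem.Chars.find l m
          if index ≠ -1 then PySem.List.slice l none (some index) else l) (line.take c.toNat)
        = line.take (ms.foldl (fun c m =>
            ((hitsOf line m).find? (fun i => decide (i + (m.length : Int) ≤ c))).getD c) c).toNat
      ∧ 0 ≤ ms.foldl (fun c m =>
            ((hitsOf line m).find? (fun i => decide (i + (m.length : Int) ≤ c))).getD c) c
      ∧ ms.foldl (fun c m =>
            ((hitsOf line m).find? (fun i => decide (i + (m.length : Int) ≤ c))).getD c) c
          ≤ (line.length : Int) := by
  intro ms
  induction ms with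
  | nil => intro c h0 h1; exact ⟨rfl, h0, h1⟩
  | cons m rest ih =>
    intro c h0 h1
    simp only [List.foldl_cons]
    rw [step_eq line m c h0 h1]
    set i := PySem.Chars.find (line.take c.toNat) m with hi
    by_cases hne : i ≠ -1
    · have hipos : 0 ≤ i := by
        have := PySem.Chars.neg_one_le_find (line.take c.toNat) m
        rw [← hi] at this; omega
      have hile : i ≤ c := by
        have := PySem.Chars.find_le_length (line.take c.toNat) m
        rw [← hi] at this
        simp only [List.length_take] at this
        omega
      have hslice : PySem.List.slice (line.take c.toNat) none (some i) = line.take i.toNat := by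
        rw [PySem.List.slice_to _ hipos, List.take_take]
        congr 1
        omega
      simp only [if_pos hne, hslice]
      exact ih i hipos (le_trans hile h1)
    · simp only [if_neg hne]
      exact ih c h0 h1

-- the outer loop: accumulate-with-'\n' then drop the last character  =  join
lemma outer_flat (f : List Char → List Char) (ls : List (List Char)) (acc : List Char) :
    ls.foldl (fun out l => out ++ f l ++ ['\n']) acc = acc ++ ls.flatMap (fun l => f l ++ ['\n']) := by
  rw [PySem.List.foldl_congr_mem ls _ (fun out l => out ++ (f l ++ ['\n'])) acc
        (by intro acc' x _; rw [List.append_assoc])]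
  exact PySem.List.foldl_append_eq_flatMap _ ls acc

lemma dropLast_flat (f : List Char → List Char) :
    ∀ ls : List (List Char),
      (ls.flatMap (fun l => f l ++ ['\n'])).dropLast = PySem.Chars.join ['\n'] (ls.map f) := by
  intro ls
  induction ls with
  | nil => simp [PySem.Chars.join_nil]
  | cons a t ih =>
    cases t with
    | nil => simp [PySem.Chars.join_singleton]
    | cons b t' =>
      rw [List.flatMap_cons, List.map_cons, List.map_cons, PySem.Chars.join_cons_cons]
      rw [List.dropLast_append_of_ne_nil (by simp [List.flatMap_cons])]
      rw [List.map_cons] at ih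
      rw [ih]

-- per line, A's processed line equals B's
lemma line_eq (line : List Char) (markers : List String) :
    markers.foldl (fun l marker =>
        let index := PySem.Chars.find l marker.toList
        if index ≠ -1 then PySem.List.slice l none (some index) else l) line
      = PySem.List.slice line none (some (cutB line (markers.map String.toList))) := by
  have h := inner_loop line (markers.map String.toList) (line.length : Int) (by positivity) le_rfl
  rw [List.foldl_map] at h
  have htake : List.take ((line.length : Int)).toNat line = line := by simp
  rw [htake] at h
  unfold cutB
  rw [List.foldl_map] at h
  rw [cut_fold_eq line _ _ PySem.Dict.empty (by intro k v hv; simp [PySem.Dict.get?_empty] at hv),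
    List.foldl_map]
  exact h.1.trans (PySem.List.slice_to line h.2.1).symm

-- ===== VERDICT (by name: the statement is the Claim_ definition above) =====
theorem solution_spec : Claim_equal_solution := by
  intro string markers _
  show solution string markers = solution_alt string markers
  simp only [solution, solution_alt]
  congr 1
  rw [outer_flat (fun line => pyRstripSpace (markers.foldl (fun l marker =>
      let index := PySem.Chars.find l marker.toList
      if index ≠ -1 then PySem.List.slice l none (some index) else l) line))]
  rw [List.nil_append, PySem.List.slice_to_neg_one, dropLast_flat]
  congr 1
  apply List.map_congr_left
  intro line _
  exact congrArg pyRstripSpace (line_eq line markers)
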